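-- pv_equiv track=rewrite | github.com/amiyasekhar/LegalAI | clustering_approaches/scripts/zsl.py | preprocess_contract
-- ===== SOURCE A (Python) =====
-- def preprocess_contract(contract):
--     cleaned_paragraphs = []
--     temp_paragraph = ""
--
--     for line in contract.split("\n"):
--         cleaned_line = line.strip()
--
--         # If the line contains a page marker (e.g., "|--- PAGE X ---|"), skip it
--         if cleaned_line.startswith("|--- PAGE") and cleaned_line.endswith("---|"):
--             if temp_paragraph:
--                 cleaned_paragraphs.append(temp_paragraph.strip())
--                 temp_paragraph = ""  # Reset for the next paragraph
--         else:
--             temp_paragraph += " " + cleaned_line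
--
--     if temp_paragraph:
--         cleaned_paragraphs.append(temp_paragraph.strip())
--     return cleaned_paragraphs
-- ===== SOURCE B (Python) =====
-- def _is_marker(line):
--     cleaned = line.strip()
--     return cleaned.startswith("|--- PAGE") and cleaned.endswith("---|")
--
--
-- def preprocess_contract(contract):
--     # Phase 1: group the lines into runs separated by page markers.
--     runs = [[]]
--     for line in contract.split("\n"):
--         if _is_marker(line):
--             runs.append([])
--         else:
--             runs[-1].append(line)
--     # Phase 2: each non-empty run becomes one paragraph.
--     return [" ".join(l.strip() for l in r).strip() for r in runs if r]
-- ===== Notes on version B (the rewrite author's own statement) =====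
-- stated objective: simpler
-- what changed: Replaced A's single pass with a growing string accumulator, inline emission and a trailing flush by two plain phases: group the lines into marker-separated runs, then map each non-empty run to the space-join of its stripped lines.
import Mathlib
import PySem

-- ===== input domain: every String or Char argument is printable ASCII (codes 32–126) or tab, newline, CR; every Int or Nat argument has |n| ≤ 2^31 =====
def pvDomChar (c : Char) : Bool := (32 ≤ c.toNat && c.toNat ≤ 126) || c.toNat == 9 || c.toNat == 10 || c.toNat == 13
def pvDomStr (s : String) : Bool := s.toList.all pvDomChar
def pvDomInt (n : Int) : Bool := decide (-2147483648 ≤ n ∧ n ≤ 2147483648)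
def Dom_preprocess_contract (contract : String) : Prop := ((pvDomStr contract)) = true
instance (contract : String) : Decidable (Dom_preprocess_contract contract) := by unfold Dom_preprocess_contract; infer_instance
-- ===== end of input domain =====

-- B groups the lines into marker-separated runs first and then maps each non-empty
-- run to a joined paragraph (two simple phases instead of A's single pass with a
-- growing string accumulator and a trailing flush); objective: simpler, not faster.

-- ===== PORT A =====
def preprocess_contract (contract : String) : List String :=
  let r := ((PySem.Str.split? contract "\n").getD []).foldl
    (fun (st : List String × String) line =>
      let cleaned_line := PySem.Str.strip line
      if PySem.Str.startswith cleaned_line "|--- PAGE" && PySem.Str.endswith cleaned_line "---|" then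
        if st.2 ≠ "" then (st.1 ++ [PySem.Str.strip st.2], "") else st
      else (st.1, st.2 ++ " " ++ cleaned_line))
    ([], "")
  if r.2 ≠ "" then r.1 ++ [PySem.Str.strip r.2] else r.1

-- ===== PORT B =====
def pcIsMarker (line : String) : Bool :=
  let cleaned := PySem.Str.strip line
  PySem.Str.startswith cleaned "|--- PAGE" && PySem.Str.endswith cleaned "---|"

def pcPara (r : List String) : String :=
  PySem.Str.strip (PySem.Str.join " " (r.map PySem.Str.strip))

def preprocess_contract_alt (contract : String) : List String :=
  let runs := ((PySem.Str.split? contract "\n").getD []).foldl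
    (fun (runs : List (List String)) line =>
      if pcIsMarker line then runs ++ [[]]
      else runs.dropLast ++ [runs.getLastD [] ++ [line]])
    [[]]
  (runs.filter (fun r => !r.isEmpty)).map pcPara

-- ===== PRECONDITION & SPEC =====
def Spec_preprocess_contract (contract : String) (out : List String) : Prop := out = preprocess_contract_alt contract
instance (contract : String) (out : List String) : Decidable (Spec_preprocess_contract contract out) := by unfold Spec_preprocess_contract; infer_instance

-- ===== CLAIM (what is proved, stated in full; the proofs are below) =====
def Claim_equal_preprocess_contract : Prop := ∀ (contract : String), Dom_preprocess_contract contract → Spec_preprocess_contract contract (preprocess_contract contract)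

-- ===== LEMMAS AND PROOFS =====

-- the run-splitting both programs perform, as a structural recursion (proof tool)
def pcRuns : List String → List String → List (List String)
  | [], cur => [cur]
  | l :: ls, cur => if pcIsMarker l then cur :: pcRuns ls [] else pcRuns ls (cur ++ [l])

-- A's string accumulator after having seen the lines `run` of the current paragraph
def pcRunStr (run : List String) : String :=
  run.foldl (fun t l => t ++ " " ++ PySem.Str.strip l) ""

lemma pcRunStr_toList (run : List String) :
    ∀ t : String, ((run.foldl (fun t l => t ++ " " ++ PySem.Str.strip l) t)).toList
      = t.toList ++ run.flatMap (fun l => ' ' :: (PySem.Str.strip l).toList) := by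
  induction run with
  | nil => simp
  | cons l ls ih =>
      intro t
      simp [List.foldl_cons, ih, String.toList_append]

lemma pcRunStr_ne_empty (l : String) (ls : List String) : pcRunStr (l :: ls) ≠ "" := by
  intro h
  have := congrArg String.toList h
  rw [pcRunStr, pcRunStr_toList] at this
  simp at this

lemma strip_cons_space (cs : List Char) : PySem.Chars.strip (' ' :: cs) = PySem.Chars.strip cs := by
  simp [PySem.Chars.strip, PySem.Chars.lstrip, List.dropWhile, PySem.Chars.isspace]

lemma flatMap_space_join (l : String) (ls : List String) :
    (l :: ls).flatMap (fun x => ' ' :: (PySem.Str.strip x).toList)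
      = ' ' :: PySem.Chars.join [' '] ((l :: ls).map (fun x => (PySem.Str.strip x).toList)) := by
  induction ls generalizing l with
  | nil => simp [PySem.Chars.join, List.intercalate]
  | cons b bs ih =>
      simp only [List.map_cons] at ih ⊢
      rw [PySem.Chars.join_cons_cons]
      simp only [List.flatMap_cons] at ih ⊢
      rw [ih b]
      simp

lemma strip_pcRunStr (run : List String) :
    PySem.Str.strip (pcRunStr run) = pcPara run := by
  apply String.ext
  simp only [pcPara]
  rw [PySem.Str.toList_strip, PySem.Str.toList_strip, pcRunStr, pcRunStr_toList,
    PySem.Str.toList_join]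
  cases run with
  | nil => simp [PySem.Chars.join, List.intercalate]
  | cons l ls =>
      rw [show ("" : String).toList = [] from rfl, List.nil_append, flatMap_space_join,
        strip_cons_space, show (" " : String).toList = [' '] from rfl]
      congr 1
      simp [List.map_map, Function.comp_def]

-- the output A produces from the remaining lines, current paragraph lines `run`
def pcOut : List String → List String → List String
  | [], run => if run.isEmpty then [] else [pcPara run]
  | l :: ls, run =>
      if pcIsMarker l then (if run.isEmpty then [] else [pcPara run]) ++ pcOut ls []
      else pcOut ls (run ++ [l])

def pcStepA (st : List String × String) (line : String) : List String × String :=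
  let cleaned_line := PySem.Str.strip line
  if PySem.Str.startswith cleaned_line "|--- PAGE" && PySem.Str.endswith cleaned_line "---|" then
    if st.2 ≠ "" then (st.1 ++ [PySem.Str.strip st.2], "") else st
  else (st.1, st.2 ++ " " ++ cleaned_line)

def pcFinish (r : List String × String) : List String :=
  if r.2 ≠ "" then r.1 ++ [PySem.Str.strip r.2] else r.1

lemma pcFoldA (ls : List String) : ∀ (acc run : List String),
    pcFinish (ls.foldl pcStepA (acc, pcRunStr run)) = acc ++ pcOut ls run := by
  induction ls with
  | nil =>
      intro acc run
      cases run with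
      | nil => simp [pcRunStr, pcOut, pcFinish]
      | cons l t =>
          simp only [List.foldl_nil, pcOut, List.isEmpty_cons, pcFinish]
          rw [if_pos (pcRunStr_ne_empty l t), strip_pcRunStr]
          simp
  | cons l ls ih =>
      intro acc run
      simp only [List.foldl_cons]
      by_cases hm : (PySem.Str.startswith (PySem.Str.strip l) "|--- PAGE"
          && PySem.Str.endswith (PySem.Str.strip l) "---|") = true
      · have hm' : pcIsMarker l = true := by simpa [pcIsMarker] using hm
        cases run with
        | nil =>
            simp only [pcStepA, hm, if_true]
            rw [if_neg (show ¬(pcRunStr [] ≠ "") by simp [pcRunStr])]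
            rw [ih acc []]
            simp [pcOut, hm']
        | cons r t =>
            simp only [pcStepA, hm, if_true]
            rw [if_pos (pcRunStr_ne_empty r t), strip_pcRunStr]
            have h0 : pcRunStr [] = "" := by simp [pcRunStr]
            have := ih (acc ++ [pcPara (r :: t)]) []
            rw [h0] at this
            rw [this]
            simp [pcOut, hm']
      · have hm' : pcIsMarker l = false := by simpa [pcIsMarker] using hm
        simp only [pcStepA, hm, if_false, Bool.false_eq_true]
        have hstep : pcRunStr run ++ " " ++ PySem.Str.strip l = pcRunStr (run ++ [l]) := by
          simp [pcRunStr, List.foldl_append]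
        rw [hstep]
        rw [ih acc (run ++ [l])]
        simp [pcOut, hm']

lemma pcFoldB (ls : List String) : ∀ (init : List (List String)) (cur : List String),
    ls.foldl
      (fun (runs : List (List String)) line =>
        if pcIsMarker line then runs ++ [[]]
        else runs.dropLast ++ [runs.getLastD [] ++ [line]])
      (init ++ [cur]) = init ++ pcRuns ls cur := by
  induction ls with
  | nil => intro init cur; simp [pcRuns]
  | cons l ls ih =>
      intro init cur
      simp only [List.foldl_cons]
      by_cases hm : pcIsMarker l = true
      · rw [if_pos hm]
        rw [ih (init ++ [cur]) []]
        simp [pcRuns, hm]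
      · rw [if_neg hm, List.dropLast_concat, List.getLastD_concat]
        rw [ih init (cur ++ [l])]
        simp [pcRuns, hm]

lemma pcOut_eq_runs (ls : List String) : ∀ run,
    pcOut ls run = ((pcRuns ls run).filter (fun r => !r.isEmpty)).map pcPara := by
  induction ls with
  | nil =>
      intro run
      cases run <;> simp [pcOut, pcRuns]
  | cons l ls ih =>
      intro run
      by_cases hm : pcIsMarker l = true
      · cases run <;> simp [pcOut, pcRuns, hm, ih]
      · simp [pcOut, pcRuns, hm, ih]

-- ===== VERDICT (by name: the statement is the Claim_ definition above) =====
theorem preprocess_contract_spec : Claim_equal_preprocess_contract := by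
  intro contract _
  unfold Spec_preprocess_contract
  show pcFinish (((PySem.Str.split? contract "\n").getD []).foldl pcStepA ([], "")) = _
  unfold preprocess_contract_alt
  have hA := pcFoldA ((PySem.Str.split? contract "\n").getD []) [] []
  have hB := pcFoldB ((PySem.Str.split? contract "\n").getD []) [] []
  simp only [pcRunStr, List.foldl_nil, List.nil_append] at hA hB
  rw [hA, hB, pcOut_eq_runs]
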